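-- pv_equiv track=rewrite | github.com/blender/blender | scripts/addons_core/bl_pkg/cli/blender_ext.py | toml_repr_string
-- ===== SOURCE A (Python) =====
-- def toml_repr_string(text: str) -> str:
--     # Encode a string for literal inclusion as a value in a TOML file (including quotes).
--     import string
--     # NOTE: this could be empty, using literal characters ensures simple strings & paths are readable.
--     literal_chars = set(string.digits + string.ascii_letters + "/_-. ")
--     result = ["\""]
--     for c in text:
--         if c in literal_chars:
--             result.append(c)
--         elif (c_scalar := ord(c)) <= 0xffff:
--             result.append("\\u{:04x}".format(c_scalar))
--         else:
--             result.append("\\U{:08x}".format(c_scalar))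
--     result.append("\"")
--     return "".join(result)
-- ===== SOURCE B (Python) =====
-- import re
--
-- _TOML_NONLITERAL = re.compile(r'[^0-9A-Za-z/_. -]')
--
--
-- def _toml_escape_match(m):
--     c_scalar = ord(m.group(0))
--     if c_scalar <= 0xffff:
--         return "\\u{:04x}".format(c_scalar)
--     return "\\U{:08x}".format(c_scalar)
--
--
-- def toml_repr_string(text: str) -> str:
--     # Encode a string for literal inclusion as a value in a TOML file (including quotes).
--     return '"' + _TOML_NONLITERAL.sub(_toml_escape_match, text) + '"'
-- ===== Notes on version B (the rewrite author's own statement) =====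
-- stated objective: idiomatic
-- what changed: Replaces the explicit per-character loop with set membership and a result-list accumulator by a single compiled regex (negated character class) driving re.sub with an escape callback; the C regex engine scans literal runs without per-char Python bytecode.
import Mathlib
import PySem

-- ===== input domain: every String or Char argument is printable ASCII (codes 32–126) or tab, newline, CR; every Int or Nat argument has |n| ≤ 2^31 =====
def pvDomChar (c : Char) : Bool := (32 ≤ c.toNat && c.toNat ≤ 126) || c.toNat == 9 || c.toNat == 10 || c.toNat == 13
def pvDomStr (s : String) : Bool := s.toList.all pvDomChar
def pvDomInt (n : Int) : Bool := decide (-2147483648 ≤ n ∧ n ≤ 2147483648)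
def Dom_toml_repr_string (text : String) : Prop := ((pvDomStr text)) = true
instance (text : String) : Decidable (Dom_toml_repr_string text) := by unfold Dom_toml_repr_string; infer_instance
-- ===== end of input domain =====

-- B replaces A's explicit membership-testing loop with a compiled regex (negated character
-- class) driving re.sub with an escape callback; objective: idiomatic; measured constant-factor faster.

-- ===== PORT A =====
-- "\\u{:04x}".format(n) / "\\U{:08x}".format(n): lowercase hex, zero-padded to the width;
-- exact for the Nat code points produced by ord(c) (Nat.toDigits 16 yields lowercase hex digits).
def pvFmtHex (n : Nat) (width : Nat) : List Char :=
  let ds := Nat.toDigits 16 n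
  List.replicate (width - ds.length) '0' ++ ds

-- set(string.digits + string.ascii_letters + "/_-. ")  (membership only, so a list is exact)
def tomlLiteralChars : List Char :=
  "0123456789abcdefghijklmnopqrstuvwxyzABCDEFGHIJKLMNOPQRSTUVWXYZ/_-. ".toList

def toml_repr_string (text : String) : String :=
  let result : List String := text.toList.foldl (fun result c =>
    if c ∈ tomlLiteralChars then
      result ++ [String.ofList [c]]
    else if c.toNat ≤ 0xffff then
      result ++ [String.ofList ('\\' :: 'u' :: pvFmtHex c.toNat 4)]
    else
      result ++ [String.ofList ('\\' :: 'U' :: pvFmtHex c.toNat 8)]) [String.ofList ['"']]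
  PySem.Str.join "" (result ++ [String.ofList ['"']])

-- ===== PORT B =====
-- the compiled pattern r'[^0-9A-Za-z/_. -]': true iff the single character c matches
def pvPatMatch (c : Char) : Bool :=
  !(('0' ≤ c && c ≤ '9') || ('A' ≤ c && c ≤ 'Z') || ('a' ≤ c && c ≤ 'z')
    || c == '/' || c == '_' || c == '.' || c == ' ' || c == '-')

-- the callback _toml_escape_match on a single-character match
def pvEscMatch (c : Char) : List Char :=
  if c.toNat ≤ 0xffff then '\\' :: 'u' :: pvFmtHex c.toNat 4
  else '\\' :: 'U' :: pvFmtHex c.toNat 8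

-- re.sub for a single-character pattern: scan left to right, replace each match by the
-- callback's result, copy non-matching characters unchanged (exact for this pattern).
def pvReSub : List Char → List Char
  | [] => []
  | c :: rest => (if pvPatMatch c then pvEscMatch c else [c]) ++ pvReSub rest

def toml_repr_string_alt (text : String) : String :=
  String.ofList ('"' :: (pvReSub text.toList ++ ['"']))

-- ===== PRECONDITION & SPEC =====
def Spec_toml_repr_string (text : String) (out : String) : Prop := out = toml_repr_string_alt text
instance (text : String) (out : String) : Decidable (Spec_toml_repr_string text out) := by unfold Spec_toml_repr_string; infer_instance

-- ===== CLAIM (what is proved, stated in full; the proofs are below) =====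
def Claim_equal_toml_repr_string : Prop := ∀ (text : String), Dom_toml_repr_string text → Spec_toml_repr_string text (toml_repr_string text)

-- ===== LEMMAS AND PROOFS =====

-- the per-character piece both programs produce, as a list of chars
def pvPiece (c : Char) : List Char :=
  if c ∈ tomlLiteralChars then [c] else pvEscMatch c

-- the regex character class agrees with A's literal set on the (ASCII) domain
set_option maxRecDepth 4096 in
lemma pvPat_eq_mem (c : Char) (h : pvDomChar c = true) :
    pvPatMatch c = !(decide (c ∈ tomlLiteralChars)) := by
  have hk : c.toNat < 128 := by
    simp only [pvDomChar, Bool.or_eq_true, Bool.and_eq_true, decide_eq_true_eq,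
      beq_iff_eq] at h
    omega
  have hofNat : Char.ofNat c.toNat = c := Char.ofNat_toNat c
  have hall : ∀ k : Nat, k < 128 →
      pvPatMatch (Char.ofNat k) = !(decide (Char.ofNat k ∈ tomlLiteralChars)) := by decide
  simpa [hofNat] using hall c.toNat hk

-- B's substitution is the flattening of the per-character pieces
lemma pvReSub_eq_flatten (l : List Char) (h : ∀ c ∈ l, pvDomChar c = true) :
    pvReSub l = (l.map pvPiece).flatten := by
  induction l with
  | nil => rfl
  | cons c rest ih =>
    have hc := h c (List.mem_cons_self ..)
    have hrest := ih (fun d hd => h d (List.mem_cons_of_mem _ hd))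
    simp only [pvReSub, List.map_cons, List.flatten_cons, hrest, pvPat_eq_mem c hc, pvPiece]
    by_cases hm : c ∈ tomlLiteralChars <;> simp [hm, pvEscMatch]

-- A's loop accumulates exactly the per-character pieces (as strings), back of the list
lemma pvFoldl_eq_map (l : List Char) (init : List String) :
    l.foldl (fun result c =>
      if c ∈ tomlLiteralChars then
        result ++ [String.ofList [c]]
      else if c.toNat ≤ 0xffff then
        result ++ [String.ofList ('\\' :: 'u' :: pvFmtHex c.toNat 4)]
      else
        result ++ [String.ofList ('\\' :: 'U' :: pvFmtHex c.toNat 8)]) init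
    = init ++ l.map (fun c => String.ofList (pvPiece c)) := by
  induction l generalizing init with
  | nil => simp
  | cons c rest ih =>
    simp only [List.foldl_cons, List.map_cons, ih]
    by_cases hm : c ∈ tomlLiteralChars
    · simp [hm, pvPiece]
    · by_cases hs : c.toNat ≤ 0xffff <;> simp [hm, hs, pvPiece, pvEscMatch, List.append_assoc]

-- ''.join over chars is flattening
lemma pvJoin_nil (xs : List (List Char)) : PySem.Chars.join [] xs = xs.flatten := by
  induction xs with
  | nil => rfl
  | cons a l ih =>
    cases l with
    | nil => simp [PySem.Chars.join, List.intercalate]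
    | cons b m => simp_all [PySem.Chars.join_cons_cons]

-- ===== VERDICT (by name: the statement is the Claim_ definition above) =====
theorem toml_repr_string_spec : Claim_equal_toml_repr_string := by
  intro text hdom
  unfold Spec_toml_repr_string
  apply String.toList_inj.mp
  have hchars : ∀ c ∈ text.toList, pvDomChar c = true := by
    simpa [pvDomStr, List.all_eq_true, Dom_toml_repr_string] using hdom
  simp only [toml_repr_string, toml_repr_string_alt, pvFoldl_eq_map, pysem, PySem.Str.join]
  rw [show "".toList = ([] : List Char) from rfl, pvJoin_nil]
  simp [pvReSub_eq_flatten text.toList hchars, List.map_map, Function.comp_def]
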